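-- pv_equiv track=rewrite | github.com/eliottcassidy2000/math | 04-computation/projective_algebraic_deep_S71n.py | direct_sum
-- ===== SOURCE A (Python) =====
-- def direct_sum(n1, A1, n2, A2, direction='forward'):
--     """Direct sum: tournament on n1+n2 with all arcs from V1 to V2."""
--     n = n1 + n2
--     A = [[0]*n for _ in range(n)]
--     # Copy A1
--     for i in range(n1):
--         for j in range(n1):
--             A[i][j] = A1[i][j]
--     # Copy A2
--     for i in range(n2):
--         for j in range(n2):
--             A[n1+i][n1+j] = A2[i][j]
--     # Cross arcs: all from V1 to V2 (forward) or V2 to V1 (backward)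
--     if direction == 'forward':
--         for i in range(n1):
--             for j in range(n2):
--                 A[i][n1+j] = 1
--     else:
--         for i in range(n2):
--             for j in range(n1):
--                 A[n1+i][j] = 1
--     return A
-- ===== SOURCE B (Python) =====
-- def direct_sum(n1, A1, n2, A2, direction='forward'):
--     """Direct sum: tournament on n1+n2 with all arcs from V1 to V2."""
--     n = n1 + n2
--     f = 1 if direction == 'forward' else 0
--     return [[A1[i][j] if i < n1 and j < n1
--              else A2[i - n1][j - n1] if i >= n1 and j >= n1
--              else f if i < n1
--              else 1 - f
--              for j in range(n)]
--             for i in range(n)]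
-- ===== Notes on version B (the rewrite author's own statement) =====
-- stated objective: alternative
-- what changed: B computes each cell directly from its quadrant in one nested comprehension instead of allocating a zero matrix and mutating it with four block-copy/overwrite loop passes.
-- outside the precondition, e.g. on direct_sum(-1, [], 2, [[0, 1], [1, 0]], 'forward'): A returns [[0]], B returns [[0]]
import Mathlib
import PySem

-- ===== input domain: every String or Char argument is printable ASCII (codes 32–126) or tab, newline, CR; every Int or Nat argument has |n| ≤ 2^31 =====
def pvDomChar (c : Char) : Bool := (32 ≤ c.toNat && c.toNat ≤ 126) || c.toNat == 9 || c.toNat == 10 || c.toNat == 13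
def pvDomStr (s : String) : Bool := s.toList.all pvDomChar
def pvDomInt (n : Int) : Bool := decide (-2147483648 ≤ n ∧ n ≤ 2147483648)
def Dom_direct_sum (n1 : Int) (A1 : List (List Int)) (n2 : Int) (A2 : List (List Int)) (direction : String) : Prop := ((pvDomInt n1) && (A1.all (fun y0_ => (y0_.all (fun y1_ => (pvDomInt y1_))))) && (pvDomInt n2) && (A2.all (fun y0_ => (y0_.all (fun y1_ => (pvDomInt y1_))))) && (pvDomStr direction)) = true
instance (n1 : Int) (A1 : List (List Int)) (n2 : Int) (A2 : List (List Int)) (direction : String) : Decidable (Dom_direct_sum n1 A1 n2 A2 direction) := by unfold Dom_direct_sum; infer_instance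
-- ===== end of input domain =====

-- B builds each cell directly from its quadrant in one nested comprehension instead of
-- mutating a zero matrix with four block-copy/overwrite loop passes (objective: alternative).

-- M[i][j] read for 0 ≤ i, j (exact for Python's in-range non-negative indexing; Pre_ keeps indices in range)
def at2 (M : List (List Int)) (i j : Nat) : Int := (M.getD i []).getD j 0

-- Python 'A[i][j] = v' for 0 ≤ i, j (exact for in-range indices; Pre_ keeps them in range)
def setCell (M : List (List Int)) (i j : Nat) (v : Int) : List (List Int) :=
  M.set i ((M.getD i []).set j v)

-- ===== PORT A =====
def direct_sum (n1 : Int) (A1 : List (List Int)) (n2 : Int) (A2 : List (List Int)) (direction : String) : List (List Int) :=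
  -- n = n1 + n2; A = [[0]*n for _ in range(n)]
  let A0 := List.replicate (n1 + n2).toNat (List.replicate (n1 + n2).toNat (0 : Int))
  -- Copy A1
  let Aa := (List.range n1.toNat).foldl (fun A i =>
              (List.range n1.toNat).foldl (fun A j => setCell A i j (at2 A1 i j)) A) A0
  -- Copy A2
  let Ab := (List.range n2.toNat).foldl (fun A i =>
              (List.range n2.toNat).foldl (fun A j => setCell A (n1.toNat + i) (n1.toNat + j) (at2 A2 i j)) A) Aa
  -- Cross arcs
  if direction = "forward" then
    (List.range n1.toNat).foldl (fun A i =>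
      (List.range n2.toNat).foldl (fun A j => setCell A i (n1.toNat + j) 1) A) Ab
  else
    (List.range n2.toNat).foldl (fun A i =>
      (List.range n1.toNat).foldl (fun A j => setCell A (n1.toNat + i) j 1) A) Ab

-- ===== PORT B =====
def direct_sum_alt (n1 : Int) (A1 : List (List Int)) (n2 : Int) (A2 : List (List Int)) (direction : String) : List (List Int) :=
  let f : Int := if direction = "forward" then 1 else 0
  (List.range (n1 + n2).toNat).map fun (i : Nat) =>
    (List.range (n1 + n2).toNat).map fun (j : Nat) =>
      if (i : Int) < n1 ∧ (j : Int) < n1 then at2 A1 i j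
      else if n1 ≤ (i : Int) ∧ n1 ≤ (j : Int) then at2 A2 (i - n1.toNat) (j - n1.toNat)
      else if (i : Int) < n1 then f
      else 1 - f

-- ===== PRECONDITION & SPEC =====
-- Pre_: non-negative part sizes with matrices covering their part, or both sizes
-- non-positive (empty result). It excludes inputs where Python A raises IndexError, and the
-- corner n1 < 0 < n2, where A's value rests on negative-index wraparound writes — a
-- defensible-corner artefact of A's implementation.
def Pre_direct_sum (n1 : Int) (A1 : List (List Int)) (n2 : Int) (A2 : List (List Int)) (direction : String) : Prop :=
  (0 ≤ n1 ∧ 0 ≤ n2 ∧ n1.toNat ≤ A1.length ∧ n2.toNat ≤ A2.length ∧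
   (∀ row ∈ A1.take n1.toNat, n1.toNat ≤ row.length) ∧
   (∀ row ∈ A2.take n2.toNat, n2.toNat ≤ row.length)) ∨
  (n1 ≤ 0 ∧ n2 ≤ 0)
instance (n1 : Int) (A1 : List (List Int)) (n2 : Int) (A2 : List (List Int)) (direction : String) : Decidable (Pre_direct_sum n1 A1 n2 A2 direction) := by unfold Pre_direct_sum; infer_instance

def pvWitness_direct_sum : Int × List (List Int) × Int × List (List Int) × String :=
  (1, [[0]], 1, [[0]], "forward")

def Spec_direct_sum (n1 : Int) (A1 : List (List Int)) (n2 : Int) (A2 : List (List Int)) (direction : String) (out : List (List Int)) : Prop := out = direct_sum_alt n1 A1 n2 A2 direction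
instance (n1 : Int) (A1 : List (List Int)) (n2 : Int) (A2 : List (List Int)) (direction : String) (out : List (List Int)) : Decidable (Spec_direct_sum n1 A1 n2 A2 direction out) := by unfold Spec_direct_sum; infer_instance

-- ===== CLAIM (what is proved, stated in full; the proofs are below) =====
def Claim_equal_direct_sum : Prop := ∀ (n1 : Int) (A1 : List (List Int)) (n2 : Int) (A2 : List (List Int)) (direction : String), Dom_direct_sum n1 A1 n2 A2 direction → Pre_direct_sum n1 A1 n2 A2 direction → Spec_direct_sum n1 A1 n2 A2 direction (direct_sum n1 A1 n2 A2 direction)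

-- ===== LEMMAS AND PROOFS =====

-- the n×n matrix tabulating F
def tab (n : Nat) (F : Nat → Nat → Int) : List (List Int) :=
  (List.range n).map fun i => (List.range n).map (F i)

-- pointwise override of F by one update (i, j, v)
def ov (F : Nat → Nat → Int) (p : Nat × Nat × Int) : Nat → Nat → Int :=
  fun i j => if i = p.1 ∧ j = p.2.1 then p.2.2 else F i j

def applyUps (ups : List (Nat × Nat × Int)) (F : Nat → Nat → Int) : Nat → Nat → Int :=
  ups.foldl ov F

lemma tab_congr {n : Nat} {F G : Nat → Nat → Int}
    (h : ∀ i < n, ∀ j < n, F i j = G i j) : tab n F = tab n G := by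
  unfold tab
  refine List.map_congr_left (fun i hi => List.map_congr_left (fun j hj => ?_))
  exact h i (List.mem_range.mp hi) j (List.mem_range.mp hj)

lemma set_map_range {n j : Nat} (G : Nat → Int) (v : Int) :
    ((List.range n).map G).set j v = (List.range n).map (fun x => if x = j then v else G x) := by
  apply List.ext_getElem
  · simp
  · intro x h1 h2
    simp only [List.getElem_set, List.getElem_map, List.getElem_range]
    simp only [List.length_set, List.length_map, List.length_range] at h1
    by_cases hx : x = j
    · simp [hx]
    · rw [if_neg (fun h => hx h.symm), if_neg hx]

lemma set_map_range_rows {n i : Nat} (R : Nat → List Int) (row : List Int) :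
    ((List.range n).map R).set i row = (List.range n).map (fun x => if x = i then row else R x) := by
  apply List.ext_getElem
  · simp
  · intro x h1 h2
    simp only [List.getElem_set, List.getElem_map, List.getElem_range]
    simp only [List.length_set, List.length_map, List.length_range] at h1
    by_cases hx : x = i
    · simp [hx]
    · rw [if_neg (fun h => hx h.symm), if_neg hx]

lemma setCell_tab {n : Nat} (F : Nat → Nat → Int) {i : Nat} (j : Nat) (v : Int) (hi : i < n) :
    setCell (tab n F) i j v = tab n (ov F (i, j, v)) := by
  unfold setCell tab
  have hrow : (((List.range n).map fun i => (List.range n).map (F i)).getD i []) =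
      (List.range n).map (F i) := by
    rw [List.getD, List.getElem?_map, List.getElem?_range hi]
    rfl
  rw [hrow, set_map_range, set_map_range_rows]
  refine List.map_congr_left (fun x hx => ?_)
  by_cases hxi : x = i
  · subst hxi
    rw [if_pos rfl]
    refine List.map_congr_left (fun y hy => ?_)
    simp [ov]
  · simp only [if_neg hxi]
    refine List.map_congr_left (fun y hy => ?_)
    simp [ov, hxi]

lemma foldl_setCell {n : Nat} (ups : List (Nat × Nat × Int)) (F : Nat → Nat → Int)
    (h : ∀ p ∈ ups, p.1 < n) :
    ups.foldl (fun A p => setCell A p.1 p.2.1 p.2.2) (tab n F) = tab n (applyUps ups F) := by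
  induction ups generalizing F with
  | nil => rfl
  | cons p rest ih =>
      rw [List.foldl_cons, setCell_tab F p.2.1 p.2.2 (h p List.mem_cons_self)]
      exact ih (ov F p) (fun q hq => h q (List.mem_cons_of_mem _ hq))

lemma applyUps_not_mem (ups : List (Nat × Nat × Int)) (F : Nat → Nat → Int) (i j : Nat)
    (h : ∀ v, (i, j, v) ∉ ups) : applyUps ups F i j = F i j := by
  induction ups generalizing F with
  | nil => rfl
  | cons p rest ih =>
      obtain ⟨a, b, w⟩ := p
      have h' : ∀ v, (i, j, v) ∉ rest := fun v hv => h v (List.mem_cons_of_mem _ hv)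
      rw [applyUps, List.foldl_cons, ← applyUps, ih _ h']
      have : ¬(i = a ∧ j = b) := by
        rintro ⟨rfl, rfl⟩
        exact h w List.mem_cons_self
      simp [ov, this]

lemma applyUps_mem (ups : List (Nat × Nat × Int)) (F : Nat → Nat → Int) (i j : Nat) (v : Int)
    (hm : (i, j, v) ∈ ups) (hu : ∀ v', (i, j, v') ∈ ups → v' = v) :
    applyUps ups F i j = v := by
  induction ups generalizing F with
  | nil => simp at hm
  | cons p rest ih =>
      obtain ⟨a, b, w⟩ := p
      rw [applyUps, List.foldl_cons, ← applyUps]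
      by_cases hr : ∃ v', (i, j, v') ∈ rest
      · obtain ⟨v', hv'⟩ := hr
        obtain rfl : v' = v := hu v' (List.mem_cons_of_mem _ hv')
        exact ih _ hv' (fun v'' h'' => hu v'' (List.mem_cons_of_mem _ h''))
      · rw [not_exists] at hr
        rw [applyUps_not_mem _ _ _ _ hr]
        rcases List.mem_cons.mp hm with hhead | htail
        · simp only [Prod.mk.injEq] at hhead
          obtain ⟨rfl, rfl, rfl⟩ := hhead
          simp [ov]
        · exact absurd htail (hr v)

-- the three passes of A, flattened to update lists
def P1 (m : Nat) (A1 : List (List Int)) : List (Nat × Nat × Int) :=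
  (List.range m).flatMap fun i => (List.range m).map fun j => (i, j, at2 A1 i j)
def P2 (m k : Nat) (A2 : List (List Int)) : List (Nat × Nat × Int) :=
  (List.range k).flatMap fun i => (List.range k).map fun j => (m + i, m + j, at2 A2 i j)
def P3f (m k : Nat) : List (Nat × Nat × Int) :=
  (List.range m).flatMap fun i => (List.range k).map fun j => (i, m + j, (1 : Int))
def P3b (m k : Nat) : List (Nat × Nat × Int) :=
  (List.range k).flatMap fun i => (List.range m).map fun j => (m + i, j, (1 : Int))

lemma mem_P1 {m : Nat} {A1 : List (List Int)} {a b : Nat} {v : Int} :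
    (a, b, v) ∈ P1 m A1 ↔ a < m ∧ b < m ∧ v = at2 A1 a b := by
  simp only [P1, List.mem_flatMap, List.mem_map, List.mem_range, Prod.mk.injEq]
  constructor
  · rintro ⟨i, hi, j, hj, rfl, rfl, rfl⟩; exact ⟨hi, hj, rfl⟩
  · rintro ⟨ha, hb, rfl⟩; exact ⟨a, ha, b, hb, rfl, rfl, rfl⟩

lemma mem_P2 {m k : Nat} {A2 : List (List Int)} {a b : Nat} {v : Int} :
    (a, b, v) ∈ P2 m k A2 ↔ ∃ i < k, ∃ j < k, a = m + i ∧ b = m + j ∧ v = at2 A2 i j := by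
  simp only [P2, List.mem_flatMap, List.mem_map, List.mem_range, Prod.mk.injEq]
  constructor
  · rintro ⟨i, hi, j, hj, rfl, rfl, rfl⟩; exact ⟨i, hi, j, hj, rfl, rfl, rfl⟩
  · rintro ⟨i, hi, j, hj, rfl, rfl, rfl⟩; exact ⟨i, hi, j, hj, rfl, rfl, rfl⟩

lemma mem_P3f {m k : Nat} {a b : Nat} {v : Int} :
    (a, b, v) ∈ P3f m k ↔ a < m ∧ (∃ j < k, b = m + j) ∧ v = 1 := by
  simp only [P3f, List.mem_flatMap, List.mem_map, List.mem_range, Prod.mk.injEq]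
  constructor
  · rintro ⟨i, hi, j, hj, rfl, rfl, rfl⟩; exact ⟨hi, ⟨j, hj, rfl⟩, rfl⟩
  · rintro ⟨ha, ⟨j, hj, rfl⟩, rfl⟩; exact ⟨a, ha, j, hj, rfl, rfl, rfl⟩

lemma mem_P3b {m k : Nat} {a b : Nat} {v : Int} :
    (a, b, v) ∈ P3b m k ↔ (∃ i < k, a = m + i) ∧ b < m ∧ v = 1 := by
  simp only [P3b, List.mem_flatMap, List.mem_map, List.mem_range, Prod.mk.injEq]
  constructor
  · rintro ⟨i, hi, j, hj, rfl, rfl, rfl⟩; exact ⟨⟨i, hi, rfl⟩, hj, rfl⟩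
  · rintro ⟨⟨i, hi, rfl⟩, hb, rfl⟩; exact ⟨i, hi, b, hb, rfl, rfl, rfl⟩

lemma pass1_eq (m : Nat) (A1 : List (List Int)) (A0 : List (List Int)) :
    (List.range m).foldl (fun A i => (List.range m).foldl (fun A j => setCell A i j (at2 A1 i j)) A) A0
      = (P1 m A1).foldl (fun A p => setCell A p.1 p.2.1 p.2.2) A0 := by
  rw [P1, List.foldl_flatMap]
  simp [List.foldl_map]

lemma pass2_eq (m k : Nat) (A2 : List (List Int)) (A0 : List (List Int)) :
    (List.range k).foldl (fun A i => (List.range k).foldl (fun A j => setCell A (m + i) (m + j) (at2 A2 i j)) A) A0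
      = (P2 m k A2).foldl (fun A p => setCell A p.1 p.2.1 p.2.2) A0 := by
  rw [P2, List.foldl_flatMap]
  simp [List.foldl_map]

lemma pass3f_eq (m k : Nat) (A0 : List (List Int)) :
    (List.range m).foldl (fun A i => (List.range k).foldl (fun A j => setCell A i (m + j) 1) A) A0
      = (P3f m k).foldl (fun A p => setCell A p.1 p.2.1 p.2.2) A0 := by
  rw [P3f, List.foldl_flatMap]
  simp [List.foldl_map]

lemma pass3b_eq (m k : Nat) (A0 : List (List Int)) :
    (List.range k).foldl (fun A i => (List.range m).foldl (fun A j => setCell A (m + i) j 1) A) A0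
      = (P3b m k).foldl (fun A p => setCell A p.1 p.2.1 p.2.2) A0 := by
  rw [P3b, List.foldl_flatMap]
  simp [List.foldl_map]

lemma rep_tab (n : Nat) :
    List.replicate n (List.replicate n (0 : Int)) = tab n (fun _ _ => 0) := by
  unfold tab
  rw [List.map_const', List.length_range]
  congr 1
  rw [List.map_const', List.length_range]

-- ===== VERDICT (by name: the statement is the Claim_ definition above) =====
theorem direct_sum_spec : Claim_equal_direct_sum := by
  intro n1 A1 n2 A2 direction _hDom hPre
  rcases hPre with ⟨h1, h2, -⟩ | ⟨h1, h2⟩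
  case inr =>
    have e1 : n1.toNat = 0 := Int.toNat_of_nonpos h1
    have e2 : n2.toNat = 0 := Int.toNat_of_nonpos h2
    have e3 : (n1 + n2).toNat = 0 := by omega
    unfold Spec_direct_sum direct_sum direct_sum_alt
    simp only [e1, e2, e3, List.range_zero, List.replicate_zero, List.foldl_nil, List.map_nil]
    split <;> rfl
  unfold Spec_direct_sum direct_sum direct_sum_alt
  lift n1 to ℕ using h1 with m
  lift n2 to ℕ using h2 with k
  have hn : ((m : Int) + (k : Int)).toNat = m + k := by omega
  have hm : ((m : Int)).toNat = m := by omega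
  have hk : ((k : Int)).toNat = k := by omega
  simp only [hn, hm, hk]
  rw [rep_tab, pass1_eq, foldl_setCell _ _ (by
        intro p hp; obtain ⟨a, b, v⟩ := p
        rw [mem_P1] at hp; omega),
      pass2_eq, foldl_setCell _ _ (by
        intro p hp; obtain ⟨a, b, v⟩ := p
        rw [mem_P2] at hp; obtain ⟨i, hi, j, hj, rfl, -, -⟩ := hp; omega)]
  by_cases hd : direction = "forward"
  · simp only [if_pos hd]
    rw [pass3f_eq, foldl_setCell _ _ (by
          intro p hp; obtain ⟨a, b, v⟩ := p
          rw [mem_P3f] at hp; omega)]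
    symm
    apply tab_congr
    intro i hi j hj
    rcases Nat.lt_or_ge i m with him | him <;> rcases Nat.lt_or_ge j m with hjm | hjm
    · -- top-left: A1 block
      rw [applyUps_not_mem _ _ _ _ (by
            intro v hv; rw [mem_P3f] at hv; omega),
          applyUps_not_mem _ _ _ _ (by
            intro v hv; rw [mem_P2] at hv; obtain ⟨i', hi', j', hj', h', -, -⟩ := hv; omega),
          applyUps_mem _ _ _ _ (at2 A1 i j) (mem_P1.mpr ⟨him, hjm, rfl⟩)
            (fun v' hv' => (mem_P1.mp hv').2.2)]
      rw [if_pos (by constructor <;> omega)]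
    · -- top-right: cross, forward → 1
      rw [applyUps_mem _ _ _ _ 1 (mem_P3f.mpr ⟨him, ⟨j - m, by omega, by omega⟩, rfl⟩)
            (fun v' hv' => (mem_P3f.mp hv').2.2)]
      rw [if_neg (by omega), if_neg (by omega), if_pos (by omega)]
    · -- bottom-left: stays 0
      rw [applyUps_not_mem _ _ _ _ (by
            intro v hv; rw [mem_P3f] at hv; omega),
          applyUps_not_mem _ _ _ _ (by
            intro v hv; rw [mem_P2] at hv; obtain ⟨i', hi', j', hj', -, h', -⟩ := hv; omega),
          applyUps_not_mem _ _ _ _ (by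
            intro v hv; rw [mem_P1] at hv; omega)]
      rw [if_neg (by omega), if_neg (by omega), if_neg (by omega)]
      norm_num
    · -- bottom-right: A2 block
      rw [applyUps_not_mem _ _ _ _ (by
            intro v hv; rw [mem_P3f] at hv; omega),
          applyUps_mem _ _ _ _ (at2 A2 (i - m) (j - m))
            (mem_P2.mpr ⟨i - m, by omega, j - m, by omega, by omega, by omega, rfl⟩)
            (by
              intro v' hv'; rw [mem_P2] at hv'
              obtain ⟨i', hi', j', hj', ha, hb, rfl⟩ := hv'
              obtain rfl : i' = i - m := by omega
              obtain rfl : j' = j - m := by omega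
              rfl)]
      rw [if_neg (by omega), if_pos (by constructor <;> omega)]
  · simp only [if_neg hd]
    rw [pass3b_eq, foldl_setCell _ _ (by
          intro p hp; obtain ⟨a, b, v⟩ := p
          rw [mem_P3b] at hp; obtain ⟨⟨i', hi', rfl⟩, -, -⟩ := hp; omega)]
    symm
    apply tab_congr
    intro i hi j hj
    rcases Nat.lt_or_ge i m with him | him <;> rcases Nat.lt_or_ge j m with hjm | hjm
    · -- top-left: A1 block
      rw [applyUps_not_mem _ _ _ _ (by
            intro v hv; rw [mem_P3b] at hv; obtain ⟨⟨i', hi', h'⟩, -, -⟩ := hv; omega),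
          applyUps_not_mem _ _ _ _ (by
            intro v hv; rw [mem_P2] at hv; obtain ⟨i', hi', j', hj', h', -, -⟩ := hv; omega),
          applyUps_mem _ _ _ _ (at2 A1 i j) (mem_P1.mpr ⟨him, hjm, rfl⟩)
            (fun v' hv' => (mem_P1.mp hv').2.2)]
      rw [if_pos (by constructor <;> omega)]
    · -- top-right: cross, backward → 0
      rw [applyUps_not_mem _ _ _ _ (by
            intro v hv; rw [mem_P3b] at hv; obtain ⟨⟨i', hi', h'⟩, -, -⟩ := hv; omega),
          applyUps_not_mem _ _ _ _ (by
            intro v hv; rw [mem_P2] at hv; obtain ⟨i', hi', j', hj', h', -, -⟩ := hv; omega),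
          applyUps_not_mem _ _ _ _ (by
            intro v hv; rw [mem_P1] at hv; omega)]
      rw [if_neg (by omega), if_neg (by omega), if_pos (by omega)]
    · -- bottom-left: cross, backward → 1
      rw [applyUps_mem _ _ _ _ 1 (mem_P3b.mpr ⟨⟨i - m, by omega, by omega⟩, hjm, rfl⟩)
            (fun v' hv' => (mem_P3b.mp hv').2.2)]
      rw [if_neg (by omega), if_neg (by omega), if_neg (by omega)]
      norm_num
    · -- bottom-right: A2 block
      rw [applyUps_not_mem _ _ _ _ (by
            intro v hv; rw [mem_P3b] at hv; omega),
          applyUps_mem _ _ _ _ (at2 A2 (i - m) (j - m))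
            (mem_P2.mpr ⟨i - m, by omega, j - m, by omega, by omega, by omega, rfl⟩)
            (by
              intro v' hv'; rw [mem_P2] at hv'
              obtain ⟨i', hi', j', hj', ha, hb, rfl⟩ := hv'
              obtain rfl : i' = i - m := by omega
              obtain rfl : j' = j - m := by omega
              rfl)]
      rw [if_neg (by omega), if_pos (by constructor <;> omega)]
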